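-- pv_equiv track=rewrite | github.com/caozhichongchong/crispr_finder | bin/crispr.py | split_donor
-- ===== SOURCE A (Python) =====
-- def spacer_donor(spacer):
--     genome = spacer.split('__')[0]
--     donor = genome.split('_')[0]
--     species = genome.split('_')[1]
--     return [donor,species,genome]
--
-- def split_donor(spacer_list,target,output_list):
--     allgenome = set()
--     allspecies = set()
--     for spacer in spacer_list:
--         donor, species, genome = spacer_donor(spacer)
--         allgenome.add(genome)
--         allspecies.add(species)
--     if len(allspecies) > 1:
--         tag = 'diffgenome.diffspecies'
--     elif len(allgenome) > 1:
--         tag = 'diffgenome.samespecies'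
--     else:
--         tag = 'samegenome'
--     for spacer in spacer_list:
--         donor, species, genome = spacer_donor(spacer)
--         output_list.add('%s\t%s\t%s\t%s\t%s\t\n'%(target,tag,species, genome,spacer))
--     return output_list
-- ===== SOURCE B (Python) =====
-- def split_donor(spacer_list, target, output_list):
--     # Parse once into (species, genome) records; detect diversity by SORTING the
--     # records and scanning adjacent pairs (sort-based distinctness, no hash sets);
--     # emit via set.update over the record table zipped with the spacers.
--     recs = [(sp.split('__')[0].split('_')[1], sp.split('__')[0]) for sp in spacer_list]
--     srt = sorted(recs)
--     if any(a[0] != b[0] for a, b in zip(srt, srt[1:])):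
--         tag = 'diffgenome.diffspecies'
--     elif any(a[1] != b[1] for a, b in zip(srt, srt[1:])):
--         tag = 'diffgenome.samespecies'
--     else:
--         tag = 'samegenome'
--     output_list.update('%s\t%s\t%s\t%s\t%s\t\n' % (target, tag, s, g, sp)
--                        for (s, g), sp in zip(recs, spacer_list))
--     return output_list
-- ===== Notes on version B (the rewrite author's own statement) =====
-- stated objective: alternative
-- what changed: B parses each spacer once into a record table and detects genome/species diversity by sorting the records and scanning adjacent pairs (sort-based distinctness instead of hash-set cardinality), then emits via set.update over the table zipped with the spacers.
import Mathlib
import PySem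

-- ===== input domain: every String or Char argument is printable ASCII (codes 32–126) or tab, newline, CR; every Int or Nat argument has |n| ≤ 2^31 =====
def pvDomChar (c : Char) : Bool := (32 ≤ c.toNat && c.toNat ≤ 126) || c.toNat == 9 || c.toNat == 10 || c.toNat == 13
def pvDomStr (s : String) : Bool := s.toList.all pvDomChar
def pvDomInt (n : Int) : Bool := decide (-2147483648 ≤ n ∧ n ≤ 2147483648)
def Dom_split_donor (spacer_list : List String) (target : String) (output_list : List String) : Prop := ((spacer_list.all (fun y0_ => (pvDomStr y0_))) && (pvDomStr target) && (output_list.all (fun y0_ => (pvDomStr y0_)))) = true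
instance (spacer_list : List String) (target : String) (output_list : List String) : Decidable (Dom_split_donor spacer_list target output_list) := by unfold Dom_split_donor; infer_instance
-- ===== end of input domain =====

-- B parses once into a record table and detects diversity by sorting the records and
-- scanning adjacent pairs instead of A's two parsing passes with hash sets (objective: alternative).
-- 'output_list' is a Python set; both versions add to it, the equivalence is about the returned set.

-- ===== PORT A =====
-- spacer.split('_')[1] raises IndexError in Python when the first '__'-piece has no '_';
-- the port's pyGetD default "" is only reached outside Pre_split_donor.
def spacer_donor (spacer : String) : String × String × String :=
  let genome := PySem.List.pyGetD ((PySem.Str.split? spacer "__").getD []) 0 ""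
  let donor := PySem.List.pyGetD ((PySem.Str.split? genome "_").getD []) 0 ""
  let species := PySem.List.pyGetD ((PySem.Str.split? genome "_").getD []) 1 ""
  (donor, species, genome)

def split_donor (spacer_list : List String) (target : String) (output_list : List String) : List String :=
  let sets := spacer_list.foldl
    (fun (st : PySem.Set String × PySem.Set String) spacer =>
      let r := spacer_donor spacer
      (PySem.Set.add st.1 r.2.2, PySem.Set.add st.2 r.2.1))
    (PySem.Set.empty, PySem.Set.empty)
  let tag :=
    if PySem.Set.len sets.2 > 1 then "diffgenome.diffspecies"
    else if PySem.Set.len sets.1 > 1 then "diffgenome.samespecies"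
    else "samegenome"
  spacer_list.foldl
    (fun acc spacer =>
      let r := spacer_donor spacer
      PySem.Set.add acc (target ++ "\t" ++ tag ++ "\t" ++ r.2.1 ++ "\t" ++ r.2.2 ++ "\t" ++ spacer ++ "\t\n"))
    output_list

-- ===== PORT B =====
def parseRecord (spacer : String) : String × String :=
  let genome := PySem.List.pyGetD ((PySem.Str.split? spacer "__").getD []) 0 ""
  (PySem.List.pyGetD ((PySem.Str.split? genome "_").getD []) 1 "", genome)

def split_donor_alt (spacer_list : List String) (target : String) (output_list : List String) : List String :=
  let recs := spacer_list.map parseRecord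
  let srt := PySem.List.sorted2 recs (fun r => r.1) (fun r => r.2)
  let tag :=
    if (srt.zip srt.tail).any (fun p => p.1.1 != p.2.1) then "diffgenome.diffspecies"
    else if (srt.zip srt.tail).any (fun p => p.1.2 != p.2.2) then "diffgenome.samespecies"
    else "samegenome"
  (recs.zip spacer_list).foldl
    (fun acc rs =>
      PySem.Set.add acc (target ++ "\t" ++ tag ++ "\t" ++ rs.1.1 ++ "\t" ++ rs.1.2 ++ "\t" ++ rs.2 ++ "\t\n"))
    output_list

-- ===== PRECONDITION & SPEC =====
-- Pre_ excludes spacers whose first '__'-piece contains no '_': there Python A raises IndexError.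
def Pre_split_donor (spacer_list : List String) (target : String) (output_list : List String) : Prop :=
  ∀ spacer ∈ spacer_list,
    2 ≤ (((PySem.Str.split? (PySem.List.pyGetD ((PySem.Str.split? spacer "__").getD []) 0 "") "_").getD [])).length
instance (spacer_list : List String) (target : String) (output_list : List String) : Decidable (Pre_split_donor spacer_list target output_list) := by unfold Pre_split_donor; infer_instance

def pvWitness_split_donor : List String × String × List String :=
  (["d1_s1__x", "d2_s1__y"], "T", ["z\n"])

def Spec_split_donor (spacer_list : List String) (target : String) (output_list : List String) (out : List String) : Prop := out = split_donor_alt spacer_list target output_list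
instance (spacer_list : List String) (target : String) (output_list : List String) (out : List String) : Decidable (Spec_split_donor spacer_list target output_list out) := by unfold Spec_split_donor; infer_instance

-- ===== CLAIM (what is proved, stated in full; the proofs are below) =====
def Claim_equal_split_donor : Prop := ∀ (spacer_list : List String) (target : String) (output_list : List String), Dom_split_donor spacer_list target output_list → Pre_split_donor spacer_list target output_list → Spec_split_donor spacer_list target output_list (split_donor spacer_list target output_list)

-- ===== LEMMAS AND PROOFS =====

-- A's paired fold splits into two independent folds.
theorem foldl_pair {α β γ : Type} (l : List γ) (f : α → γ → α) (g : β → γ → β) (a : α) (b : β) :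
    l.foldl (fun st x => (f st.1 x, g st.2 x)) (a, b) = (l.foldl f a, l.foldl g b) := by
  induction l generalizing a b with
  | nil => rfl
  | cons x t ih => simp [List.foldl, ih]

-- a Nodup list has length ≤ 1 iff all its members coincide
theorem nodup_len_le_one {α : Type} [DecidableEq α] (s : List α) (hn : s.Nodup) :
    s.length ≤ 1 ↔ ∀ a ∈ s, ∀ b ∈ s, a = b := by
  cases s with
  | nil => simp
  | cons a t =>
    cases t with
    | nil => simp
    | cons b u =>
      constructor
      · intro h; simp at h
      · intro h
        have hab : a = b := h a (by simp) b (by simp)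
        have hmem : a ∈ b :: u := by simp [hab]
        exact absurd hmem (List.nodup_cons.mp hn).1

-- set(xs) has more than one element iff two elements of xs differ
theorem ofList_len_gt_one {α : Type} [DecidableEq α] (xs : List α) :
    1 < (PySem.Set.ofList xs : List α).length ↔ ∃ a ∈ xs, ∃ b ∈ xs, a ≠ b := by
  have hn := PySem.Set.nodup_ofList (xs := xs)
  have hle := nodup_len_le_one (PySem.Set.ofList xs) hn
  constructor
  · intro h
    by_contra hc
    push_neg at hc
    have hall : ∀ a ∈ (PySem.Set.ofList xs : List α), ∀ b ∈ (PySem.Set.ofList xs : List α), a = b := by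
      intro a ha b hb
      rw [PySem.Set.mem_ofList] at ha hb
      exact hc a ha b hb
    have := hle.mpr hall
    omega
  · rintro ⟨a, ha, b, hb, hne⟩
    by_contra h
    push_neg at h
    have hall := hle.mp (by omega)
    exact hne (hall a (by rw [PySem.Set.mem_ofList]; exact ha) b (by rw [PySem.Set.mem_ofList]; exact hb))

-- some adjacent pair differs under f iff some two elements differ under f (any list)
theorem adj_any_iff {α β : Type} [DecidableEq β] (l : List α) (f : α → β) :
    (l.zip l.tail).any (fun p => f p.1 != f p.2) = true ↔ ∃ a ∈ l, ∃ b ∈ l, f a ≠ f b := by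
  induction l with
  | nil => simp
  | cons x t ih =>
    cases t with
    | nil => simp
    | cons y u =>
      simp only [List.tail_cons, List.zip_cons_cons, List.any_cons, Bool.or_eq_true,
        bne_iff_ne, ne_eq] at *
      constructor
      · rintro (hxy | hrest)
        · exact ⟨x, by simp, y, by simp, hxy⟩
        · obtain ⟨a, ha, b, hb, hne⟩ := ih.mp hrest
          exact ⟨a, by simp [ha], b, by simp [hb], hne⟩
      · rintro ⟨a, ha, b, hb, hne⟩
        by_cases hxy : f x = f y
        · right
          apply ih.mpr
          rcases List.mem_cons.mp ha with rfl | ha'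
          · rcases List.mem_cons.mp hb with rfl | hb'
            · exact absurd rfl hne
            · exact ⟨y, by simp, b, hb', by rw [← hxy]; exact hne⟩
          · rcases List.mem_cons.mp hb with rfl | hb'
            · exact ⟨a, ha', y, by simp, by rw [← hxy]; exact hne⟩
            · exact ⟨a, ha', b, hb', hne⟩
        · exact Or.inl hxy

-- both diversity tests reduce to 'two spacers differ under proj'
theorem cond_iff (l : List String) (proj : String × String → String)
    (hp : ∀ s, proj (parseRecord s) = (spacer_donor s).2.1 ∨ proj (parseRecord s) = (spacer_donor s).2.2) :
    ((PySem.List.sorted2 (l.map parseRecord) (fun r => r.1) (fun r => r.2)).zip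
       (PySem.List.sorted2 (l.map parseRecord) (fun r => r.1) (fun r => r.2)).tail).any
         (fun p => proj p.1 != proj p.2) = true ↔
    ∃ a ∈ l.map (fun s => proj (parseRecord s)), ∃ b ∈ l.map (fun s => proj (parseRecord s)), a ≠ b := by
  rw [adj_any_iff]
  have hmem : ∀ r, r ∈ PySem.List.sorted2 (l.map parseRecord) (fun r => r.1) (fun r => r.2) ↔
      r ∈ l.map parseRecord := fun r =>
    (PySem.List.sorted2_perm (xs := l.map parseRecord) (k1 := fun r => r.1) (k2 := fun r => r.2)
      (rev := false)).mem_iff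
  constructor
  · rintro ⟨a, ha, b, hb, hne⟩
    rw [hmem] at ha hb
    obtain ⟨x, hx, rfl⟩ := List.mem_map.mp ha
    obtain ⟨y, hy, rfl⟩ := List.mem_map.mp hb
    exact ⟨proj (parseRecord x), List.mem_map.mpr ⟨x, hx, rfl⟩,
           proj (parseRecord y), List.mem_map.mpr ⟨y, hy, rfl⟩, hne⟩
  · rintro ⟨a, ha, b, hb, hne⟩
    obtain ⟨x, hx, rfl⟩ := List.mem_map.mp ha
    obtain ⟨y, hy, rfl⟩ := List.mem_map.mp hb
    exact ⟨parseRecord x, (hmem _).mpr (List.mem_map.mpr ⟨x, hx, rfl⟩),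
           parseRecord y, (hmem _).mpr (List.mem_map.mpr ⟨y, hy, rfl⟩), hne⟩

theorem parseRecord_fst (s : String) : (parseRecord s).1 = (spacer_donor s).2.1 := rfl
theorem parseRecord_snd (s : String) : (parseRecord s).2 = (spacer_donor s).2.2 := rfl

theorem speciesCond (l : List String) :
    1 < PySem.Set.len (PySem.Set.ofList (l.map (fun s => (spacer_donor s).2.1))) ↔
    ((PySem.List.sorted2 (l.map parseRecord) (fun r => r.1) (fun r => r.2)).zip
       (PySem.List.sorted2 (l.map parseRecord) (fun r => r.1) (fun r => r.2)).tail).any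
         (fun p => p.1.1 != p.2.1) = true := by
  have h1 : 1 < PySem.Set.len (PySem.Set.ofList (l.map (fun s => (spacer_donor s).2.1))) ↔
      1 < (PySem.Set.ofList (l.map (fun s => (spacer_donor s).2.1)) : List String).length := by
    rw [PySem.Set.len_eq]; exact_mod_cast Iff.rfl
  rw [h1, ofList_len_gt_one]
  rw [cond_iff l (fun r => r.1) (fun s => Or.inl (parseRecord_fst s))]
  simp only [parseRecord_fst]

theorem genomeCond (l : List String) :
    1 < PySem.Set.len (PySem.Set.ofList (l.map (fun s => (spacer_donor s).2.2))) ↔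
    ((PySem.List.sorted2 (l.map parseRecord) (fun r => r.1) (fun r => r.2)).zip
       (PySem.List.sorted2 (l.map parseRecord) (fun r => r.1) (fun r => r.2)).tail).any
         (fun p => p.1.2 != p.2.2) = true := by
  have h1 : 1 < PySem.Set.len (PySem.Set.ofList (l.map (fun s => (spacer_donor s).2.2))) ↔
      1 < (PySem.Set.ofList (l.map (fun s => (spacer_donor s).2.2)) : List String).length := by
    rw [PySem.Set.len_eq]; exact_mod_cast Iff.rfl
  rw [h1, ofList_len_gt_one]
  rw [cond_iff l (fun r => r.2) (fun s => Or.inr (parseRecord_snd s))]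
  simp only [parseRecord_snd]

theorem zip_map_self {α β : Type} (l : List α) (f : α → β) :
    (l.map f).zip l = l.map (fun x => (f x, x)) := by
  induction l with
  | nil => rfl
  | cons x t ih => simp [ih]

-- ===== VERDICT (by name: the statement is the Claim_ definition above) =====
theorem split_donor_spec : Claim_equal_split_donor := by
  intro spacer_list target output_list _ _
  unfold Spec_split_donor
  simp only [split_donor, split_donor_alt]
  rw [show spacer_list.foldl
      (fun (st : PySem.Set String × PySem.Set String) spacer =>
        let r := spacer_donor spacer
        (PySem.Set.add st.1 r.2.2, PySem.Set.add st.2 r.2.1))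
      (PySem.Set.empty, PySem.Set.empty)
      = (PySem.Set.ofList (spacer_list.map (fun s => (spacer_donor s).2.2)),
         PySem.Set.ofList (spacer_list.map (fun s => (spacer_donor s).2.1))) from by
    rw [PySem.Set.ofList_eq_foldl, PySem.Set.ofList_eq_foldl,
        @List.foldl_map String String (PySem.Set String) (fun s => (spacer_donor s).2.2) PySem.Set.add spacer_list [],
        @List.foldl_map String String (PySem.Set String) (fun s => (spacer_donor s).2.1) PySem.Set.add spacer_list []]
    exact foldl_pair spacer_list
      (fun st x => PySem.Set.add st ((spacer_donor x).2.2))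
      (fun st x => PySem.Set.add st ((spacer_donor x).2.1))
      PySem.Set.empty PySem.Set.empty]
  rw [if_congr (speciesCond spacer_list) rfl (if_congr (genomeCond spacer_list) rfl rfl)]
  rw [zip_map_self, List.foldl_map]
  rfl
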